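-- pv_equiv track=rewrite | github.com/jtmoulia/dungeons-and-agents | scripts/play_game.py | get_pacing_hints
-- ===== SOURCE A (Python) =====
-- def get_pacing_hints(total_rounds: int) -> list[str]:
--     """Generate pacing hints scaled to the total number of rounds."""
--     if total_rounds <= 4:
--         return [
--             "Set the scene: the hull breach alarm, the emergency. Introduce the immediate "
--             "danger — the ship is damaged, something is aboard. Address each player character "
--             "by name and give them a situation to react to.",
--
--             "Escalate: reveal more about the creatures, introduce NPC Science Officer Lin "
--             "who knows too much. Build tension with sounds, failing systems, and dread.",
--
--             "Climax: the crew reaches the cargo bay and confronts the queen. Present the "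
--             "choice — give her the sample, destroy it, or fight. Let the players decide.",
--
--             "Resolution and epilogue. Narrate the outcome of the players' choice. The queen "
--             "leaves or attacks. Wrap up the story — rescue is coming, the truth about "
--             "Stellaris is out. End on a atmospheric note.",
--         ]
--
--     hints = []
--     # Scale phases across available rounds
--     phase_size = max(1, total_rounds // 5)
--
--     for i in range(total_rounds):
--         phase = i // phase_size if phase_size > 0 else 0
--
--         if phase == 0:
--             hints.append(
--                 "Introduce the emergency. The klaxon, the hull breach, the ship in crisis. "
--                 "Address each player by their character name and give them a starting "
--                 "situation to react to. Establish the setting aboard the MSV Koronis."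
--             )
--         elif phase == 1:
--             hints.append(
--                 "Escalate tension. Reveal more about the creatures — sounds in the vents, "
--                 "claw marks, a dead crew member. Introduce NPC Science Officer Lin, who is "
--                 "performing an autopsy and seems to know too much about these things. "
--                 "Introduce NPC Delacroix who guards a mysterious crate in the cargo bay."
--             )
--         elif phase == 2:
--             hints.append(
--                 "Mid-game development. The crew discovers the corporate conspiracy — "
--                 "Stellaris Corp knew about the creatures, the KX-7 sample is a pheromone "
--                 "beacon. Lin is a corporate handler. The captain is missing. Build toward "
--                 "the cargo bay confrontation."
--             )
--         elif phase == 3: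
--             hints.append(
--                 "Climax. The crew reaches the cargo bay and faces the Void Stalker Queen "
--                 "anchored to the breach. Present the three-way choice: give her the sample "
--                 "(she leaves peacefully), destroy it (she rages), or fight her. Let the "
--                 "players decide."
--             )
--         else:
--             hints.append(
--                 "Resolution and epilogue. Narrate the outcome of the players' choice. "
--                 "Wrap up loose threads — Lin's testimony, the distress signal, the crew's "
--                 "survival. End on an atmospheric, contemplative note. The stars are beautiful "
--                 "if you don't think about what lives between them."
--             )
--
--     return hints[:total_rounds]
-- ===== SOURCE B (Python) =====
-- INTRO_HINTS = [
--     "Set the scene: the hull breach alarm, the emergency. Introduce the immediate "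
--     "danger — the ship is damaged, something is aboard. Address each player character "
--     "by name and give them a situation to react to.",
--
--     "Escalate: reveal more about the creatures, introduce NPC Science Officer Lin "
--     "who knows too much. Build tension with sounds, failing systems, and dread.",
--
--     "Climax: the crew reaches the cargo bay and confronts the queen. Present the "
--     "choice — give her the sample, destroy it, or fight. Let the players decide.",
--
--     "Resolution and epilogue. Narrate the outcome of the players' choice. The queen "
--     "leaves or attacks. Wrap up the story — rescue is coming, the truth about "
--     "Stellaris is out. End on a atmospheric note.",
-- ]
--
-- PHASES = [
--     "Introduce the emergency. The klaxon, the hull breach, the ship in crisis. "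
--     "Address each player by their character name and give them a starting "
--     "situation to react to. Establish the setting aboard the MSV Koronis.",
--
--     "Escalate tension. Reveal more about the creatures — sounds in the vents, "
--     "claw marks, a dead crew member. Introduce NPC Science Officer Lin, who is "
--     "performing an autopsy and seems to know too much about these things. "
--     "Introduce NPC Delacroix who guards a mysterious crate in the cargo bay.",
--
--     "Mid-game development. The crew discovers the corporate conspiracy — "
--     "Stellaris Corp knew about the creatures, the KX-7 sample is a pheromone "
--     "beacon. Lin is a corporate handler. The captain is missing. Build toward "
--     "the cargo bay confrontation.",
--
--     "Climax. The crew reaches the cargo bay and faces the Void Stalker Queen "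
--     "anchored to the breach. Present the three-way choice: give her the sample "
--     "(she leaves peacefully), destroy it (she rages), or fight her. Let the "
--     "players decide.",
--
--     "Resolution and epilogue. Narrate the outcome of the players' choice. "
--     "Wrap up loose threads — Lin's testimony, the distress signal, the crew's "
--     "survival. End on an atmospheric, contemplative note. The stars are beautiful "
--     "if you don't think about what lives between them.",
-- ]
--
--
-- def get_pacing_hints(total_rounds: int) -> list[str]:
--     """Generate pacing hints scaled to the total number of rounds."""
--     if total_rounds <= 4:
--         return list(INTRO_HINTS)
--
--     # Phase-by-phase: the first four phases each cover phase_size rounds,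
--     # the final phase absorbs the remainder.
--     phase_size = max(1, total_rounds // 5)
--     counts = [phase_size] * 4 + [total_rounds - 4 * phase_size]
--     hints = []
--     for count, phase_hint in zip(counts, PHASES):
--         hints.extend([phase_hint] * count)
--     return hints
-- ===== Notes on version B (the rewrite author's own statement) =====
-- stated objective: simpler
-- what changed: Replaces the per-round loop that recomputes phase = i // phase_size and walks an if/elif cascade for every round with a per-phase construction: five repetition counts ([phase_size]*4 plus the remainder) and one list-extend per phase string.
import Mathlib
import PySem

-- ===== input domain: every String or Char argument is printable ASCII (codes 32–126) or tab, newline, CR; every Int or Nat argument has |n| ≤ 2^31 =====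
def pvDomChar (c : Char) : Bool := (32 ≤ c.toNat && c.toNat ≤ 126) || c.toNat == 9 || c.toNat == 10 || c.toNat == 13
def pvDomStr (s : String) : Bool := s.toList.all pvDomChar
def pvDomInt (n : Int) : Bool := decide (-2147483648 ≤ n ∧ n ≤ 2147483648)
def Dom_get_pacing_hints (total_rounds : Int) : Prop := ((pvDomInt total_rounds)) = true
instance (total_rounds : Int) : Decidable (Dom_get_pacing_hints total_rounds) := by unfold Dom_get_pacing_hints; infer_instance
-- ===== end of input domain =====

-- B replaces the per-round loop (one `i // phase_size` cascade per round) by a per-phase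
-- construction: five repetition counts, one `replicate`-extend per phase (objective: simpler).

-- shared string constants (exact texts from the Python sources)
def pvIntro0 : String :=
  "Set the scene: the hull breach alarm, the emergency. Introduce the immediate danger — the ship is damaged, something is aboard. Address each player character by name and give them a situation to react to."
def pvIntro1 : String :=
  "Escalate: reveal more about the creatures, introduce NPC Science Officer Lin who knows too much. Build tension with sounds, failing systems, and dread."
def pvIntro2 : String :=
  "Climax: the crew reaches the cargo bay and confronts the queen. Present the choice — give her the sample, destroy it, or fight. Let the players decide."
def pvIntro3 : String :=
  "Resolution and epilogue. Narrate the outcome of the players' choice. The queen leaves or attacks. Wrap up the story — rescue is coming, the truth about Stellaris is out. End on a atmospheric note."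
def pvPhase0 : String :=
  "Introduce the emergency. The klaxon, the hull breach, the ship in crisis. Address each player by their character name and give them a starting situation to react to. Establish the setting aboard the MSV Koronis."
def pvPhase1 : String :=
  "Escalate tension. Reveal more about the creatures — sounds in the vents, claw marks, a dead crew member. Introduce NPC Science Officer Lin, who is performing an autopsy and seems to know too much about these things. Introduce NPC Delacroix who guards a mysterious crate in the cargo bay."
def pvPhase2 : String :=
  "Mid-game development. The crew discovers the corporate conspiracy — Stellaris Corp knew about the creatures, the KX-7 sample is a pheromone beacon. Lin is a corporate handler. The captain is missing. Build toward the cargo bay confrontation."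
def pvPhase3 : String :=
  "Climax. The crew reaches the cargo bay and faces the Void Stalker Queen anchored to the breach. Present the three-way choice: give her the sample (she leaves peacefully), destroy it (she rages), or fight her. Let the players decide."
def pvPhase4 : String :=
  "Resolution and epilogue. Narrate the outcome of the players' choice. Wrap up loose threads — Lin's testimony, the distress signal, the crew's survival. End on an atmospheric, contemplative note. The stars are beautiful if you don't think about what lives between them."


-- ===== PORT A =====
-- literal transliteration of A: per-round loop, phase = i // phase_size, if-cascade, final hints[:total_rounds]
def get_pacing_hints (total_rounds : Int) : List String :=
  if total_rounds ≤ 4 then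
    [pvIntro0, pvIntro1, pvIntro2, pvIntro3]
  else
    let phase_size : Int := max 1 (PySem.Int.floordiv total_rounds 5)
    let hints : List String :=
      (PySem.List.pyRange 0 total_rounds 1).foldl (fun acc i =>
        let phase : Int := if phase_size > 0 then PySem.Int.floordiv i phase_size else 0
        acc ++ [if phase = 0 then pvPhase0
                else if phase = 1 then pvPhase1
                else if phase = 2 then pvPhase2
                else if phase = 3 then pvPhase3
                else pvPhase4]) []
    PySem.List.slice hints none (some total_rounds)

-- ===== PORT B =====
-- literal transliteration of B: counts = [ps]*4 ++ [n - 4*ps], one extend per (count, phase) pair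
def get_pacing_hints_alt (total_rounds : Int) : List String :=
  if total_rounds ≤ 4 then
    [pvIntro0, pvIntro1, pvIntro2, pvIntro3]
  else
    let phase_size : Int := max 1 (PySem.Int.floordiv total_rounds 5)
    let counts : List Int := [phase_size, phase_size, phase_size, phase_size,
                              total_rounds - 4 * phase_size]
    (List.zip counts [pvPhase0, pvPhase1, pvPhase2, pvPhase3, pvPhase4]).foldl
      (fun acc cp => acc ++ List.replicate cp.1.toNat cp.2) []

-- ===== PRECONDITION & SPEC =====
def Spec_get_pacing_hints (total_rounds : Int) (out : List String) : Prop := out = get_pacing_hints_alt total_rounds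
instance (total_rounds : Int) (out : List String) : Decidable (Spec_get_pacing_hints total_rounds out) := by unfold Spec_get_pacing_hints; infer_instance

-- ===== CLAIM (what is proved, stated in full; the proofs are below) =====
def Claim_equal_get_pacing_hints : Prop := ∀ (total_rounds : Int), Dom_get_pacing_hints total_rounds → Spec_get_pacing_hints total_rounds (get_pacing_hints total_rounds)

-- ===== LEMMAS AND PROOFS =====

-- the string A's cascade picks for Nat phase index q = i / phase_size
def pvPick (q : Nat) : String :=
  if (q : Int) = 0 then pvPhase0
  else if (q : Int) = 1 then pvPhase1
  else if (q : Int) = 2 then pvPhase2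
  else if (q : Int) = 3 then pvPhase3
  else pvPhase4

lemma pvPick_ge4 (q : Nat) (hq : 4 <= q) : pvPick q = pvPhase4 := by
  unfold pvPick
  have h0 : (q : Int) ≠ 0 := by exact_mod_cast (by omega : q ≠ 0)
  have h1 : (q : Int) ≠ 1 := by exact_mod_cast (by omega : q ≠ 1)
  have h2 : (q : Int) ≠ 2 := by exact_mod_cast (by omega : q ≠ 2)
  have h3 : (q : Int) ≠ 3 := by exact_mod_cast (by omega : q ≠ 3)
  rw [if_neg h0, if_neg h1, if_neg h2, if_neg h3]

-- A's per-round map over range m splits into B's five replications, for 0 < ps and 5 * ps ≤ m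
lemma pv_map_range_eq (ps m : Nat) (hps : 0 < ps) (hm : 5 * ps ≤ m) :
    (List.range m).map (fun i => pvPick (i / ps)) =
      List.replicate ps pvPhase0 ++ List.replicate ps pvPhase1 ++ List.replicate ps pvPhase2 ++
        List.replicate ps pvPhase3 ++ List.replicate (m - 4 * ps) pvPhase4 := by
  apply List.ext_getElem
  · simp only [List.length_map, List.length_range, List.length_append, List.length_replicate]
    omega
  · intro i h1 h2
    simp only [List.length_map, List.length_range] at h1
    simp only [List.getElem_map, List.getElem_range]
    simp only [List.getElem_append, List.length_append, List.length_replicate,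
               List.getElem_replicate]
    split_ifs <;>
      first
        | (have hd : i / ps = 0 := by apply Nat.div_eq_of_lt_le <;> omega
           rw [hd]; simp [pvPick])
        | (have hd : i / ps = 1 := by apply Nat.div_eq_of_lt_le <;> omega
           rw [hd]; simp [pvPick])
        | (have hd : i / ps = 2 := by apply Nat.div_eq_of_lt_le <;> omega
           rw [hd]; simp [pvPick])
        | (have hd : i / ps = 3 := by apply Nat.div_eq_of_lt_le <;> omega
           rw [hd]; simp [pvPick])
        | (apply pvPick_ge4; rw [Nat.le_div_iff_mul_le hps]; omega)

-- main equivalence on the interesting branch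
lemma pv_main (n : Int) (hn : 4 < n) :
    get_pacing_hints n = get_pacing_hints_alt n := by
  obtain ⟨m, rfl⟩ : ∃ m : Nat, n = (m : Int) := ⟨n.toNat, (Int.toNat_of_nonneg (by omega)).symm⟩
  have hm : 5 ≤ m := by exact_mod_cast (by omega : (5 : Int) ≤ (m : Int))
  have hps : 0 < m / 5 := Nat.div_pos hm (by omega)
  have hnle : ¬ ((m : Int) ≤ 4) := by exact_mod_cast hn.not_ge
  have hfd : PySem.Int.floordiv (m : Int) 5 = ((m / 5 : Nat) : Int) :=
    PySem.Int.floordiv_natCast m 5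
  have hmax : max 1 (PySem.Int.floordiv (m : Int) 5) = ((m / 5 : Nat) : Int) := by
    rw [hfd]
    exact max_eq_right (by exact_mod_cast hps)
  simp only [get_pacing_hints, get_pacing_hints_alt, if_neg hnle, hmax]
  -- A side: the per-round foldl is a map over range m, the slice is the identity
  rw [PySem.List.pyRange_zero_natCast m, List.foldl_map,
      PySem.List.foldl_append_singleton_eq_map, List.nil_append]
  have hcast : ∀ k : Nat,
      (let phase : Int := if ((m / 5 : Nat) : Int) > 0
          then PySem.Int.floordiv (k : Int) ((m / 5 : Nat) : Int) else 0
       if phase = 0 then pvPhase0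
       else if phase = 1 then pvPhase1
       else if phase = 2 then pvPhase2
       else if phase = 3 then pvPhase3
       else pvPhase4) = pvPick (k / (m / 5)) := by
    intro k
    have hpos : ((m / 5 : Nat) : Int) > 0 := by exact_mod_cast hps
    simp only [if_pos hpos, PySem.Int.floordiv_natCast k (m / 5), pvPick]
  simp only [hcast]
  have hlen : (List.map (fun k => pvPick (k / (m / 5))) (List.range m)).length = m := by
    simp
  rw [PySem.List.slice_to_natCast _ m, List.take_of_length_le (le_of_eq hlen)]
  -- both sides are now the five phase blocks
  rw [pv_map_range_eq (m / 5) m hps (by omega)]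
  have ht : ((m : Int) - 4 * ((m / 5 : Nat) : Int)).toNat = m - 4 * (m / 5) := by omega
  simp only [List.zip, List.zipWith, List.foldl, ht, Int.toNat_natCast, List.nil_append,
             List.append_assoc]

-- ===== VERDICT (by name: the statement is the Claim_ definition above) =====
theorem get_pacing_hints_spec : Claim_equal_get_pacing_hints := by
  intro n _
  unfold Spec_get_pacing_hints
  by_cases h : n ≤ 4
  · simp [get_pacing_hints, get_pacing_hints_alt, h]
  · exact pv_main n (by omega)
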